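-- pv_equiv track=rewrite | github.com/kpisupati07/CSPython | CompSci/pset4d/real_estate.py | devowel
-- ===== SOURCE A (Python) =====
-- def is_vowel(c):
--     """Returns true if c is an upper- or lower-case vowel character"""
--     vowels = "aeiouAEIOU"
--     # checks if c is a vowel
--     if vowels.count(c) > 0:
--         return True
--     else:
--         return False
--
-- def devowel(ad):
--     """Takes the text ad and returns a string with
--     non-initial vowels removed. The letter 'y' is not considered a
--     vowel."""
--     result = ""
--     prev_space = False#assumes it dosent start with a space
--     x = 0
--     for c in range(len(ad)):
--         # gets each character
--         char = ad[c]
--         # if it has a space before it, or is the first, because of x = 0 then it should be added to the final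
--         if is_vowel(char) and (prev_space or x == 0):
--             result += char
--             prev_space = False
--         elif not is_vowel(char):  # if not a vowel, it adds it to the final result.
--             result += char
--             # if it is a space, prev_space becomes True, so the next time it loops, the next character knows theres a space before it
--             prev_space = char == " "
--         x += 1
--     return result
-- ===== SOURCE B (Python) =====
-- def devowel(ad):
--     """Takes the text ad and returns a string with
--     non-initial vowels removed. The letter 'y' is not considered a
--     vowel."""
--     # Word-wise decomposition: split on single spaces, keep each segment's
--     # first character (covering word-initial vowels) and only the non-vowel
--     # characters of the rest, then rejoin with spaces (empty segments keep
--     # consecutive/leading/trailing spaces intact).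
--     words = ad.split(" ")
--     return " ".join(w[:1] + "".join(c for c in w[1:] if c not in "aeiouAEIOU")
--                     for w in words)
-- ===== Notes on version B (the rewrite author's own statement) =====
-- stated objective: alternative
-- what changed: Replaces the stateful index loop (prev_space flag, x counter, per-character is_vowel via str.count) by a staged word-wise decomposition: split the ad on single spaces, keep each segment's first character and filter vowels from the rest, then rejoin with spaces.
import Mathlib
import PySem

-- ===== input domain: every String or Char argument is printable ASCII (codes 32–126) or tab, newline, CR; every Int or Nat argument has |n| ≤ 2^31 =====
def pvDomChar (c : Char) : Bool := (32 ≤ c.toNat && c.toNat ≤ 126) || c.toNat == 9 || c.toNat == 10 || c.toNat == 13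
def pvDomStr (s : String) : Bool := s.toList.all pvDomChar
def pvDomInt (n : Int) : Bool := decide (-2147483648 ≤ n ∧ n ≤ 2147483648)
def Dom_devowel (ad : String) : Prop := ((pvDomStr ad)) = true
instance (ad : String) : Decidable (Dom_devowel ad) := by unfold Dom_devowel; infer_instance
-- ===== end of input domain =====

-- B rebuilds the string word-wise (split on " ", keep each segment's first character, drop vowels from the rest, rejoin with " ") instead of A's stateful character loop.

-- ===== PORT A =====
def is_vowel (c : Char) : Bool :=
  let vowels := "aeiouAEIOU"
  -- vowels.count(c) > 0
  if PySem.Chars.count vowels.toList [c] > 0 then true else false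

def devowel (ad : String) : String :=
  -- result is accumulated as a List Char; the loop index c ∈ range(len(ad)) is
  -- always in range, so ad[c] is ported exactly as pyGetD with an unused default.
  let r := (PySem.List.pyRange 0 (PySem.Str.len ad) 1).foldl
    (fun (st : List Char × Bool × Int) c =>
      let char := PySem.List.pyGetD ad.toList c ' '
      if is_vowel char && (st.2.1 || st.2.2 == 0) then
        (st.1 ++ [char], false, st.2.2 + 1)
      else if !is_vowel char then
        (st.1 ++ [char], char == ' ', st.2.2 + 1)
      else
        (st.1, st.2.1, st.2.2 + 1))
    (([] : List Char), false, (0 : Int))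
  String.ofList r.1

-- ===== PORT B =====
def devowel_alt (ad : String) : String :=
  -- ad.split(" "); per word w: w[:1] + "".join(c for c in w[1:] if c not in vowels); " ".join
  let words := PySem.Chars.splitOn ad.toList [' ']
  String.ofList (PySem.Chars.join [' ']
    (words.map (fun w =>
      PySem.List.slice w none (some 1) ++
        (PySem.List.slice w (some 1) none).filter
          (fun c => !(PySem.Chars.isIn [c] "aeiouAEIOU".toList)))))

-- ===== PRECONDITION & SPEC =====
def Spec_devowel (ad : String) (out : String) : Prop := out = devowel_alt ad
instance (ad : String) (out : String) : Decidable (Spec_devowel ad out) := by unfold Spec_devowel; infer_instance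

-- ===== CLAIM (what is proved, stated in full; the proofs are below) =====
def Claim_equal_devowel : Prop := ∀ (ad : String), Dom_devowel ad → Spec_devowel ad (devowel ad)

-- ===== LEMMAS AND PROOFS =====

-- keep a character iff it is not a vowel
def vkeep (c : Char) : Bool := !is_vowel c

-- A's loop as structural recursion: ps is the prev_space flag (true also stands
-- for "at index 0", which A's `x == 0` test makes behave identically).
def arec : List Char → Bool → List Char
  | [], _ => []
  | c :: cs, ps =>
    if is_vowel c then (if ps then c :: arec cs false else arec cs ps)
    else c :: arec cs (c == ' ')

-- B's per-word transformation, after the slices are simplified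
def fWord (w : List Char) : List Char := w.take 1 ++ w.tail.filter vkeep

-- structural single-space split (proved equal to PySem.Chars.splitOn · [' '])
def mySplit : List Char → List (List Char)
  | [] => [[]]
  | c :: r =>
    if c = ' ' then [] :: mySplit r
    else
      match mySplit r with
      | [] => [[c]]
      | p :: ps => (c :: p) :: ps

theorem mySplit_shape (l : List Char) : ∃ p ps, mySplit l = p :: ps := by
  cases l with
  | nil => exact ⟨[], [], rfl⟩
  | cons c r =>
    by_cases h : c = ' '
    · exact ⟨[], mySplit r, by simp [mySplit, h]⟩
    · rcases hr : mySplit r with _ | ⟨p, ps⟩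
      · exact ⟨[c], [], by simp [mySplit, h, hr]⟩
      · exact ⟨c :: p, ps, by simp [mySplit, h, hr]⟩

theorem count_go_pos (c : Char) : ∀ (fuel : Nat) (s : List Char) (acc : Nat), s.length ≤ fuel →
    (0 < PySem.Chars.count.go [c] fuel s acc ↔ 0 < acc ∨ c ∈ s) := by
  intro fuel
  induction fuel with
  | zero => intro s acc h
            have : s = [] := by cases s <;> simp_all
            subst this
            rw [PySem.Chars.count.go]; simp
  | succ fuel ih =>
    intro s acc h
    cases s with
    | nil => rw [PySem.Chars.count.go] <;> simp
    | cons a t =>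
      have ht : t.length ≤ fuel := by simpa using h
      rw [PySem.Chars.count.go]
      simp only [List.isPrefixOf]
      by_cases hc : c = a
      · subst hc
        simp [ih t (acc + 1) ht]
      · have : (c == a) = false := by simp [hc]
        simp [this, ih t acc ht, hc]

theorem singleton_infix_iff (c : Char) (s : List Char) : [c] <:+: s ↔ c ∈ s := by
  constructor
  · intro h; exact h.subset (by simp)
  · intro h; obtain ⟨u, v, rfl⟩ := List.append_of_mem h; exact ⟨u, v, by simp⟩

theorem vowel_mem (c : Char) : is_vowel c = true ↔ c ∈ "aeiouAEIOU".toList := by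
  have hgo := count_go_pos c ("aeiouAEIOU".toList).length "aeiouAEIOU".toList 0 le_rfl
  have hcount : 0 < PySem.Chars.count "aeiouAEIOU".toList [c] ↔ c ∈ "aeiouAEIOU".toList := by
    rw [PySem.Chars.count]
    simp only [List.isEmpty_cons, if_false, Bool.false_eq_true]
    exact hgo.trans (by simp)
  unfold is_vowel
  simp only []
  split_ifs with h
  · simpa using hcount.1 h
  · simpa using fun hm => h (hcount.2 hm)

theorem isIn_vowel (c : Char) : PySem.Chars.isIn [c] "aeiouAEIOU".toList = is_vowel c := by
  by_cases hm : c ∈ "aeiouAEIOU".toList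
  · have h1 : PySem.Chars.isIn [c] "aeiouAEIOU".toList = true := by
      rw [PySem.Chars.isIn_iff_infix, singleton_infix_iff]; exact hm
    rw [h1, (vowel_mem c).2 hm]
  · have h1 : PySem.Chars.isIn [c] "aeiouAEIOU".toList = false := by
      rw [PySem.Chars.isIn_eq_false_iff, singleton_infix_iff]; exact hm
    rw [h1]
    rcases hv : is_vowel c
    · rfl
    · exact absurd ((vowel_mem c).1 hv) hm

theorem splitOn_go_eq (fuel : Nat) : ∀ (l cur : List Char) (acc : List (List Char)), l.length < fuel →
    PySem.Chars.splitOn.go [' '] fuel l cur acc =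
      acc.reverse ++ ((cur.reverse ++ (mySplit l).headI) :: (mySplit l).tail) := by
  induction fuel with
  | zero => intro l cur acc h; omega
  | succ fuel ih =>
    intro l cur acc h
    cases l with
    | nil =>
      rw [PySem.Chars.splitOn.go] <;> simp [mySplit]
    | cons c r =>
      have hr : r.length < fuel := by simpa using h
      by_cases hc : c = ' '
      · subst hc
        rw [PySem.Chars.splitOn.go]
        simp only [List.isPrefixOf, beq_self_eq_true, Bool.true_and]
        obtain ⟨p, ps, hps⟩ := mySplit_shape r
        show PySem.Chars.splitOn.go [' '] fuel r [] (cur.reverse :: acc) = _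
        rw [ih r [] (cur.reverse :: acc) hr]
        simp [mySplit, hps]
      · rw [PySem.Chars.splitOn.go]
        have : (' ' == c) = false := by simp [Ne.symm hc]
        simp only [List.isPrefixOf, this, Bool.false_and, if_false]
        rw [ih r (c :: cur) acc hr]
        obtain ⟨p, ps, hps⟩ := mySplit_shape r
        simp [mySplit, hps, hc]

theorem splitOn_eq (l : List Char) : PySem.Chars.splitOn l [' '] = mySplit l := by
  rw [PySem.Chars.splitOn, splitOn_go_eq (l.length + 1) l [] [] (by omega)]
  obtain ⟨p, ps, hps⟩ := mySplit_shape l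
  simp [hps]

theorem join_cons_head (c : Char) (a : List Char) (rest : List (List Char)) :
    PySem.Chars.join [' '] ((c :: a) :: rest) = c :: PySem.Chars.join [' '] (a :: rest) := by
  cases rest with
  | nil => simp [PySem.Chars.join_singleton]
  | cons b t => rw [PySem.Chars.join_cons_cons, PySem.Chars.join_cons_cons]; simp

theorem arec_join (l : List Char) :
    (arec l true = PySem.Chars.join [' '] ((mySplit l).map fWord)) ∧
    (∀ p ps, mySplit l = p :: ps →
      arec l false = PySem.Chars.join [' '] (p.filter vkeep :: ps.map fWord)) := by
  induction l with
  | nil =>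
    constructor
    · simp [arec, mySplit, fWord, PySem.Chars.join_singleton]
    · intro p ps h
      simp only [mySplit] at h
      cases h
      simp [arec, PySem.Chars.join_singleton]
  | cons c r ih =>
    obtain ⟨q, qs, hqs⟩ := mySplit_shape r
    by_cases hc : c = ' '
    · subst hc
      have hsp : is_vowel ' ' = false := by decide
      have harec : arec (' ' :: r) true = ' ' :: arec r true := by simp [arec, hsp]
      have harec' : arec (' ' :: r) false = ' ' :: arec r true := by simp [arec, hsp]
      have hms : mySplit (' ' :: r) = [] :: mySplit r := by simp [mySplit]
      have hjoin : PySem.Chars.join [' '] (([] : List Char) :: (mySplit r).map fWord)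
          = ' ' :: PySem.Chars.join [' '] ((mySplit r).map fWord) := by
        rw [hqs]
        rw [List.map_cons, PySem.Chars.join_cons_cons]
        simp
      refine ⟨?_, ?_⟩
      · rw [harec, hms, List.map_cons, show fWord [] = [] from rfl, hjoin, ih.1]
      · intro p ps h
        rw [hms] at h
        cases h
        rw [harec']
        simp only [List.filter_nil]
        rw [hjoin, ih.1]
    · have hms : mySplit (c :: r) = (c :: q) :: qs := by
        simp [mySplit, hqs, hc]
      have hcs : (c == ' ') = false := by simp [hc]
      refine ⟨?_, ?_⟩
      · by_cases hv : is_vowel c = true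
        · have harec : arec (c :: r) true = c :: arec r false := by simp [arec, hv]
          rw [harec, hms, List.map_cons]
          have : fWord (c :: q) = c :: q.filter vkeep := by simp [fWord]
          rw [this, join_cons_head, ← ih.2 q qs hqs]
        · have harec : arec (c :: r) true = c :: arec r false := by
            simp [arec, hv, hcs]
          rw [harec, hms, List.map_cons]
          have : fWord (c :: q) = c :: q.filter vkeep := by simp [fWord]
          rw [this, join_cons_head, ← ih.2 q qs hqs]
      · intro p ps h
        rw [hms] at h
        cases h
        by_cases hv : is_vowel c = true
        · have harec : arec (c :: r) false = arec r false := by simp [arec, hv]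
          have hf : (c :: q).filter vkeep = q.filter vkeep := by
            simp [List.filter, vkeep, hv]
          rw [harec, hf, ih.2 q qs hqs]
        · have harec : arec (c :: r) false = c :: arec r false := by simp [arec, hv, hcs]
          have hf : (c :: q).filter vkeep = c :: q.filter vkeep := by
            simp [List.filter, vkeep, hv]
          rw [harec, hf, join_cons_head, ih.2 q qs hqs]

theorem foldA (l : List Char) : ∀ (res : List Char) (ps : Bool) (n : Int), 1 ≤ n →
    ((l.foldl (fun (st : List Char × Bool × Int) char =>
      if is_vowel char && (st.2.1 || st.2.2 == 0) then
        (st.1 ++ [char], false, st.2.2 + 1)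
      else if !is_vowel char then
        (st.1 ++ [char], char == ' ', st.2.2 + 1)
      else
        (st.1, st.2.1, st.2.2 + 1)) (res, ps, n)).1) = res ++ arec l ps := by
  induction l with
  | nil => intro res ps n hn; simp [arec]
  | cons c cs ih =>
    intro res ps n hn
    have hn0 : (n == 0) = false := by simp; omega
    simp only [List.foldl_cons]
    by_cases hv : is_vowel c = true
    · cases ps with
      | true =>
        simp only [hv, hn0, Bool.true_and, Bool.true_or, if_true]
        rw [ih (res ++ [c]) false (n+1) (by omega)]
        simp [arec, hv]
      | false =>
        simp only [hv, hn0, Bool.false_or, Bool.and_false, Bool.not_true]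
        simp only [Bool.false_eq_true, ite_false]
        rw [ih res false (n+1) (by omega)]
        simp [arec, hv]
    · have hv' : is_vowel c = false := by simpa using hv
      simp only [hv', hn0, Bool.false_and, Bool.not_false]
      simp only [Bool.false_eq_true, ite_false, ite_true]
      rw [ih (res ++ [c]) (c == ' ') (n+1) (by omega)]
      simp [arec, hv']

theorem devowel_eq_arec (ad : String) : devowel ad = String.ofList (arec ad.toList true) := by
  unfold devowel
  have h := PySem.List.foldl_pyRange_zero_pyGetD' (xs := ad.toList) (d := ' ')
    (f := fun (st : List Char × Bool × Int) char =>
      if is_vowel char && (st.2.1 || st.2.2 == 0) then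
        (st.1 ++ [char], false, st.2.2 + 1)
      else if !is_vowel char then
        (st.1 ++ [char], char == ' ', st.2.2 + 1)
      else
        (st.1, st.2.1, st.2.2 + 1))
    (init := (([] : List Char), false, (0 : Int)))
  show String.ofList
    (((PySem.List.pyRange 0 ((ad.toList.length : Int)) 1).foldl
      (fun (st : List Char × Bool × Int) c =>
        (fun (st : List Char × Bool × Int) char =>
          if is_vowel char && (st.2.1 || st.2.2 == 0) then
            (st.1 ++ [char], false, st.2.2 + 1)
          else if !is_vowel char then
            (st.1 ++ [char], char == ' ', st.2.2 + 1)
          else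
            (st.1, st.2.1, st.2.2 + 1)) st (PySem.List.pyGetD ad.toList c ' '))
      (([] : List Char), false, (0 : Int))).1) = _
  rw [h]
  congr 1
  cases hl : ad.toList with
  | nil => simp [arec]
  | cons c r =>
    simp only [List.foldl_cons]
    by_cases hv : is_vowel c = true
    · simp only [hv, Bool.false_or, beq_self_eq_true, Bool.and_true, if_true, Bool.true_and, ite_true]
      simp only [List.nil_append, zero_add]
      rw [foldA r [c] false 1 (by omega)]
      simp [arec, hv]
    · have hv' : is_vowel c = false := by simpa using hv
      simp only [hv', Bool.false_and, Bool.not_false]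
      simp only [Bool.false_eq_true, ite_false, ite_true]
      simp only [List.nil_append, zero_add]
      rw [foldA r [c] (c == ' ') 1 (by omega)]
      simp [arec, hv']

theorem devowel_alt_eq (ad : String) :
    devowel_alt ad = String.ofList (PySem.Chars.join [' '] ((mySplit ad.toList).map fWord)) := by
  unfold devowel_alt
  rw [splitOn_eq]
  have hf : (fun w => PySem.List.slice w none (some 1) ++
      (PySem.List.slice w (some 1) none).filter
        (fun c => !(PySem.Chars.isIn [c] "aeiouAEIOU".toList))) = fWord := by
    funext w
    rw [PySem.List.slice_to (xs := w) (b := (1:Int)) (by omega), PySem.List.slice_from_one]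
    unfold fWord
    refine congrArg₂ (· ++ ·) rfl ?_
    exact List.filter_congr (fun c _ => by rw [isIn_vowel]; rfl)
  rw [hf]

-- ===== VERDICT (by name: the statement is the Claim_ definition above) =====
theorem devowel_spec : Claim_equal_devowel := by
  intro ad _
  unfold Spec_devowel
  rw [devowel_eq_arec, devowel_alt_eq, (arec_join ad.toList).1]
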